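-- pv_equiv track=rewrite | github.com/CS-440-Fall-20/p2-hidden-pitbulls | music.py | _ChordToNotes
-- ===== SOURCE A (Python) =====
-- chroma = [
--   'A', 'A#', 'B', 'C', 'C#', 'D',
--   'D#', 'E', 'F', 'F#', 'G', 'G#'
-- ]
--
-- major = '02212221'
--
-- minor = '02122122'
--
-- def _ChordToNotes(chord: str):
--     '''
--     Helper function to return notes given a chord.
--     Only for chords fifth, major, minor and seventh major.
--
--     Arguments:
--     chord as a string.
--
--     Returns:
--     A list of notes.
--
--     '''
--
--     # Separating first note and chord types.
--     firstNote = ''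
--     chordType = ''
--
--     for char in chord:
--       if (char in 'ABCDEN#'):
--         firstNote += char
--       elif (char in 'm57M'):
--         chordType += char
--
--     if (len(chordType) == 0):
--       chordType += 'M'
--
--     # Finding the position of first note
--     # on the chromatic scale.
--     chromaInd = chroma.index(firstNote)
--
--     # Returning list of notes according to
--     # first note and chord type.
--     ret = [firstNote]
--
--     if (chordType == '5'):
--       for i in range(7):
--         chromaInd =+ (chromaInd + int(major[i])) % 12
--         if (i == 4):
--           ret.append(chroma[chromaInd])
--
--     elif (chordType == 'M'):
--       for i in range(7):
--         chromaInd = (chromaInd + int(major[i])) % 12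
--         if ((i == 2) or (i == 4)):
--           ret.append(chroma[chromaInd])
--
--     elif (chordType == 'm'):
--       for i in range(7):
--         chromaInd =+ (chromaInd + int(minor[i])) % 12
--         if ((i == 3) or (i == 4)):
--           ret.append(chroma[chromaInd])
--
--     else:
--       for i in range(7):
--         chromaInd =+ (chromaInd + int(major[i])) % 12
--         if ((i == 2) or (i == 4) or (i == 6)):
--           ret.append(chroma[chromaInd])
--
--     return ret
-- ===== SOURCE B (Python) =====
-- chroma = [
--   'A', 'A#', 'B', 'C', 'C#', 'D',
--   'D#', 'E', 'F', 'F#', 'G', 'G#'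
-- ]
--
-- _OFFSETS = {'5': (7,), 'M': (4, 7), 'm': (5, 7)}
--
-- def _ChordToNotes(chord: str):
--     firstNote = ''.join(c for c in chord if c in 'ABCDEN#')
--     chordType = ''.join(c for c in chord if c in 'm57M') or 'M'
--     ind = chroma.index(firstNote)
--     offsets = _OFFSETS.get(chordType, (4, 7, 11))
--     return [firstNote] + [chroma[(ind + o) % 12] for o in offsets]
-- ===== Notes on version B (the rewrite author's own statement) =====
-- stated objective: simpler
-- what changed: B keeps the same parsing and the same chroma.index lookup but replaces A's four 7-iteration digit-accumulation loops with a direct semitone-offset table keyed by the chord type (fifth 7; major 4,7; minor 5,7; default 4,7,11) and emits each note as chroma[(ind+off)%12].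
import Mathlib
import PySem

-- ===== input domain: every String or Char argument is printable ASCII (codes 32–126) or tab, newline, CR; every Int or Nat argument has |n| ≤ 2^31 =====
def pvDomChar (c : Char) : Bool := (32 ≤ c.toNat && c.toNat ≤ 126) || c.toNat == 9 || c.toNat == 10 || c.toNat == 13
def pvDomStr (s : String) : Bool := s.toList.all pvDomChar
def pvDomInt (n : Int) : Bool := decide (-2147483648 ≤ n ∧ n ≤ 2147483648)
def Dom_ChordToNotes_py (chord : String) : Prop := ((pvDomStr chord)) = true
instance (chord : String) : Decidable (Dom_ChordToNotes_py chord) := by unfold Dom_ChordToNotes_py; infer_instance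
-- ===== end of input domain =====

-- B replaces A's four 7-step accumulation loops by a direct semitone-offset table (simpler); same parsing, same chroma.index lookup.

-- ===== PORT A =====
def pvChroma : List String :=
  ["A", "A#", "B", "C", "C#", "D", "D#", "E", "F", "F#", "G", "G#"]

def pvMajor : List Char := "02212221".toList
def pvMinor : List Char := "02122122".toList

-- the two membership tests of the parsing loop (single-character membership, exact for the chars a str iterates)
def pvInNotes (c : Char) : Bool := c ∈ "ABCDEN#".toList
def pvInTypes (c : Char) : Bool := c ∈ "m57M".toList

-- int(s[i]) for the digit strings above (always in range and a digit here, so the defaults never fire)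
def pvDigit (s : List Char) (i : Int) : Int :=
  (PySem.Int.ofChars? [PySem.List.pyGetD s i ' ']).getD 0

def ChordToNotes_py (chord : String) : List String :=
  let p := chord.toList.foldl (fun (st : List Char × List Char) char =>
      if pvInNotes char then (st.1 ++ [char], st.2)
      else if pvInTypes char then (st.1, st.2 ++ [char])
      else st) ([], [])
  let firstNote := String.ofList p.1
  let chordType := if p.2.length = 0 then String.ofList (p.2 ++ ['M']) else String.ofList p.2
  match PySem.List.index? pvChroma firstNote with
  | none => []   -- ValueError in Python: excluded by Pre_
  | some idx =>
    let ret := [firstNote]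
    if chordType = "5" then
      (((PySem.List.pyRange 0 7 1).foldl (fun (st : Int × List String) i =>
        let ci := PySem.Int.mod (st.1 + pvDigit pvMajor i) 12
        (ci, if i = 4 then st.2 ++ [PySem.List.pyGetD pvChroma ci ""] else st.2))
        ((idx : Int), ret)).2)
    else if chordType = "M" then
      (((PySem.List.pyRange 0 7 1).foldl (fun (st : Int × List String) i =>
        let ci := PySem.Int.mod (st.1 + pvDigit pvMajor i) 12
        (ci, if i = 2 ∨ i = 4 then st.2 ++ [PySem.List.pyGetD pvChroma ci ""] else st.2))
        ((idx : Int), ret)).2)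
    else if chordType = "m" then
      (((PySem.List.pyRange 0 7 1).foldl (fun (st : Int × List String) i =>
        let ci := PySem.Int.mod (st.1 + pvDigit pvMinor i) 12
        (ci, if i = 3 ∨ i = 4 then st.2 ++ [PySem.List.pyGetD pvChroma ci ""] else st.2))
        ((idx : Int), ret)).2)
    else
      (((PySem.List.pyRange 0 7 1).foldl (fun (st : Int × List String) i =>
        let ci := PySem.Int.mod (st.1 + pvDigit pvMajor i) 12
        (ci, if i = 2 ∨ i = 4 ∨ i = 6 then st.2 ++ [PySem.List.pyGetD pvChroma ci ""] else st.2))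
        ((idx : Int), ret)).2)

-- ===== PORT B =====
def pvOffsets : PySem.Dict String (List Int) :=
  PySem.Dict.ofList [("5", [7]), ("M", [4, 7]), ("m", [5, 7])]

def ChordToNotes_py_alt (chord : String) : List String :=
  let firstNote := String.ofList (chord.toList.filter pvInNotes)
  let ct := chord.toList.filter pvInTypes
  let chordType := if ct = [] then "M" else String.ofList ct
  match PySem.List.index? pvChroma firstNote with
  | none => []   -- ValueError in Python: excluded by Pre_
  | some ind =>
    firstNote :: (PySem.Dict.getD pvOffsets chordType [4, 7, 11]).map
      (fun o => PySem.List.pyGetD pvChroma (PySem.Int.mod ((ind : Int) + o) 12) "")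

-- ===== PRECONDITION & SPEC =====
-- Pre_ excludes exactly the inputs on which Python's chroma.index raises ValueError:
-- the note characters kept by the parse (letters A-E, N, and the sharp sign) must spell a chromatic-scale note.
def Pre_ChordToNotes_py (chord : String) : Prop :=
  String.ofList (chord.toList.filter pvInNotes) ∈ pvChroma
instance (chord : String) : Decidable (Pre_ChordToNotes_py chord) := by
  unfold Pre_ChordToNotes_py; infer_instance

def pvWitness_ChordToNotes_py : String := "Am"

def Spec_ChordToNotes_py (chord : String) (out : List String) : Prop := out = ChordToNotes_py_alt chord
instance (chord : String) (out : List String) : Decidable (Spec_ChordToNotes_py chord out) := by unfold Spec_ChordToNotes_py; infer_instance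

-- ===== CLAIM (what is proved, stated in full; the proofs are below) =====
def Claim_equal_ChordToNotes_py : Prop := ∀ (chord : String), Dom_ChordToNotes_py chord → Pre_ChordToNotes_py chord → Spec_ChordToNotes_py chord (ChordToNotes_py chord)

-- ===== LEMMAS AND PROOFS =====

theorem pvNotTypes {c : Char} (h : pvInNotes c = true) : pvInTypes c = false := by
  simp [pvInNotes] at h
  rcases h with h|h|h|h|h|h|h <;> subst h <;> decide

theorem pvParse (cs : List Char) (a b : List Char) :
    cs.foldl (fun (st : List Char × List Char) char =>
      if pvInNotes char then (st.1 ++ [char], st.2)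
      else if pvInTypes char then (st.1, st.2 ++ [char])
      else st) (a, b)
    = (a ++ cs.filter pvInNotes, b ++ cs.filter pvInTypes) := by
  induction cs generalizing a b with
  | nil => simp
  | cons c cs ih =>
    cases hc1 : pvInNotes c
    · cases hc2 : pvInTypes c
      · simp [List.foldl_cons, hc1, hc2, ih]
      · simp [List.foldl_cons, hc1, hc2, ih]
    · simp [List.foldl_cons, hc1, pvNotTypes hc1, ih]

theorem pvLoop5 (k : Int) (s : String) :
    (((PySem.List.pyRange 0 7 1).foldl (fun (st : Int × List String) i =>
      (PySem.Int.mod (st.1 + pvDigit pvMajor i) 12,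
        if i = 4 then st.2 ++ [PySem.List.pyGetD pvChroma (PySem.Int.mod (st.1 + pvDigit pvMajor i) 12) ""] else st.2))
      (k, [s])).2)
    = s :: ([7] : List Int).map (fun o => PySem.List.pyGetD pvChroma (PySem.Int.mod (k + o) 12) "") := by
  have hr : PySem.List.pyRange 0 7 1 = [0, 1, 2, 3, 4, 5, 6] := by decide
  have d0 : pvDigit pvMajor 0 = 0 := by decide
  have d1 : pvDigit pvMajor 1 = 2 := by decide
  have d2 : pvDigit pvMajor 2 = 2 := by decide
  have d3 : pvDigit pvMajor 3 = 1 := by decide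
  have d4 : pvDigit pvMajor 4 = 2 := by decide
  have d5 : pvDigit pvMajor 5 = 2 := by decide
  have d6 : pvDigit pvMajor 6 = 2 := by decide
  simp [hr, List.foldl, d0, d1, d2, d3, d4, d5, d6]
  congr 2
  omega

theorem pvLoopM (k : Int) (s : String) :
    (((PySem.List.pyRange 0 7 1).foldl (fun (st : Int × List String) i =>
      (PySem.Int.mod (st.1 + pvDigit pvMajor i) 12,
        if i = 2 ∨ i = 4 then st.2 ++ [PySem.List.pyGetD pvChroma (PySem.Int.mod (st.1 + pvDigit pvMajor i) 12) ""] else st.2))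
      (k, [s])).2)
    = s :: ([4, 7] : List Int).map (fun o => PySem.List.pyGetD pvChroma (PySem.Int.mod (k + o) 12) "") := by
  have hr : PySem.List.pyRange 0 7 1 = [0, 1, 2, 3, 4, 5, 6] := by decide
  have d0 : pvDigit pvMajor 0 = 0 := by decide
  have d1 : pvDigit pvMajor 1 = 2 := by decide
  have d2 : pvDigit pvMajor 2 = 2 := by decide
  have d3 : pvDigit pvMajor 3 = 1 := by decide
  have d4 : pvDigit pvMajor 4 = 2 := by decide
  have d5 : pvDigit pvMajor 5 = 2 := by decide
  have d6 : pvDigit pvMajor 6 = 2 := by decide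
  simp [hr, List.foldl, d0, d1, d2, d3, d4, d5, d6]
  constructor <;> congr 2 <;> omega

theorem pvLoopm (k : Int) (s : String) :
    (((PySem.List.pyRange 0 7 1).foldl (fun (st : Int × List String) i =>
      (PySem.Int.mod (st.1 + pvDigit pvMinor i) 12,
        if i = 3 ∨ i = 4 then st.2 ++ [PySem.List.pyGetD pvChroma (PySem.Int.mod (st.1 + pvDigit pvMinor i) 12) ""] else st.2))
      (k, [s])).2)
    = s :: ([5, 7] : List Int).map (fun o => PySem.List.pyGetD pvChroma (PySem.Int.mod (k + o) 12) "") := by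
  have hr : PySem.List.pyRange 0 7 1 = [0, 1, 2, 3, 4, 5, 6] := by decide
  have d0 : pvDigit pvMinor 0 = 0 := by decide
  have d1 : pvDigit pvMinor 1 = 2 := by decide
  have d2 : pvDigit pvMinor 2 = 1 := by decide
  have d3 : pvDigit pvMinor 3 = 2 := by decide
  have d4 : pvDigit pvMinor 4 = 2 := by decide
  have d5 : pvDigit pvMinor 5 = 1 := by decide
  have d6 : pvDigit pvMinor 6 = 2 := by decide
  simp [hr, List.foldl, d0, d1, d2, d3, d4, d5, d6]
  constructor <;> congr 2 <;> omega

theorem pvLoopElse (k : Int) (s : String) :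
    (((PySem.List.pyRange 0 7 1).foldl (fun (st : Int × List String) i =>
      (PySem.Int.mod (st.1 + pvDigit pvMajor i) 12,
        if i = 2 ∨ i = 4 ∨ i = 6 then st.2 ++ [PySem.List.pyGetD pvChroma (PySem.Int.mod (st.1 + pvDigit pvMajor i) 12) ""] else st.2))
      (k, [s])).2)
    = s :: ([4, 7, 11] : List Int).map (fun o => PySem.List.pyGetD pvChroma (PySem.Int.mod (k + o) 12) "") := by
  have hr : PySem.List.pyRange 0 7 1 = [0, 1, 2, 3, 4, 5, 6] := by decide
  have d0 : pvDigit pvMajor 0 = 0 := by decide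
  have d1 : pvDigit pvMajor 1 = 2 := by decide
  have d2 : pvDigit pvMajor 2 = 2 := by decide
  have d3 : pvDigit pvMajor 3 = 1 := by decide
  have d4 : pvDigit pvMajor 4 = 2 := by decide
  have d5 : pvDigit pvMajor 5 = 2 := by decide
  have d6 : pvDigit pvMajor 6 = 2 := by decide
  simp [hr, List.foldl, d0, d1, d2, d3, d4, d5, d6]
  refine ⟨?_, ?_, ?_⟩ <;> congr 2 <;> omega

theorem pvGetD_not_key (x : String) (h5 : x ≠ "5") (hM : x ≠ "M") (hm : x ≠ "m") :
    PySem.Dict.getD pvOffsets x [4, 7, 11] = [4, 7, 11] := by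
  have hd : pvOffsets = PySem.Dict.mk [("5", [7]), ("M", [4, 7]), ("m", [5, 7])] := by decide
  simp [hd, PySem.Dict.getD, PySem.Dict.get?, Ne.symm h5, Ne.symm hM, Ne.symm hm]

theorem ChordToNotes_py_spec : Claim_equal_ChordToNotes_py := by
  intro chord _ hpre
  unfold Spec_ChordToNotes_py ChordToNotes_py ChordToNotes_py_alt
  simp only [pvParse, List.nil_append]
  rcases hidx : PySem.List.index? pvChroma (String.ofList (chord.toList.filter pvInNotes)) with _ | k
  · exact absurd hpre ((PySem.List.index?_eq_none_iff _ _).mp hidx)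
  · dsimp only
    by_cases hemp : chord.toList.filter pvInTypes = []
    · simp only [hemp, List.length_nil, if_true, List.nil_append]
      have hMstr : String.ofList ['M'] = "M" := rfl
      rw [hMstr, if_neg (by decide), pvLoopM,
          show PySem.Dict.getD pvOffsets "M" [4, 7, 11] = [4, 7] from by decide]
    · have hlen : ¬ (chord.toList.filter pvInTypes).length = 0 := by
        simpa [List.length_eq_zero_iff] using hemp
      rw [if_neg hlen, if_neg hemp]
      by_cases h5 : String.ofList (chord.toList.filter pvInTypes) = "5"
      · rw [if_pos h5, h5, pvLoop5,
            show PySem.Dict.getD pvOffsets "5" [4, 7, 11] = [7] from by decide]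
      · rw [if_neg h5]
        by_cases hM : String.ofList (chord.toList.filter pvInTypes) = "M"
        · rw [if_pos hM, hM, pvLoopM,
              show PySem.Dict.getD pvOffsets "M" [4, 7, 11] = [4, 7] from by decide]
        · rw [if_neg hM]
          by_cases hm : String.ofList (chord.toList.filter pvInTypes) = "m"
          · rw [if_pos hm, hm, pvLoopm,
                show PySem.Dict.getD pvOffsets "m" [4, 7, 11] = [5, 7] from by decide]
          · rw [if_neg hm, pvLoopElse, pvGetD_not_key _ h5 hM hm]
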